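-- pv_equiv track=rewrite | github.com/DatoDgebuadze/softweb | scripts/generate_i18n_reports.py | make_inventory_rows
-- ===== SOURCE A (Python) =====
-- def make_inventory_rows(html_keys, js_keys):
--     all_keys = sorted(html_keys.union(js_keys))
--     rows = []
--     for key in all_keys:
--         in_html = key in html_keys
--         in_js = key in js_keys
--         if in_html and in_js:
--             status = "OK"
--         elif in_html:
--             status = "Missing in JS"
--         else:
--             status = "Unused in HTML"
--         rows.append(
--             {
--                 "key": key,
--                 "in_html": str(in_html),
--                 "in_js_dictionary": str(in_js),
--                 "status": status,
--             }
--         )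
--     return rows
-- ===== SOURCE B (Python) =====
-- def make_inventory_rows(html_keys, js_keys):
--     html = set(html_keys)
--     js = set(js_keys)
--     rows = []
--     for key in html & js:
--         rows.append({"key": key, "in_html": "True",
--                      "in_js_dictionary": "True", "status": "OK"})
--     for key in html - js:
--         rows.append({"key": key, "in_html": "True",
--                      "in_js_dictionary": "False", "status": "Missing in JS"})
--     for key in js - html:
--         rows.append({"key": key, "in_html": "False",
--                      "in_js_dictionary": "True", "status": "Unused in HTML"})
--     rows.sort(key=lambda r: r["key"])
--     return rows
-- ===== Notes on version B (the rewrite author's own statement) =====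
-- stated objective: alternative
-- what changed: Instead of per-key membership tests inside one loop over the sorted union, B partitions the keys with set algebra (&, -) into the three disjoint status classes, emits each class's rows with fixed constant fields, and sorts the assembled row list by key at the end.
import Mathlib
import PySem

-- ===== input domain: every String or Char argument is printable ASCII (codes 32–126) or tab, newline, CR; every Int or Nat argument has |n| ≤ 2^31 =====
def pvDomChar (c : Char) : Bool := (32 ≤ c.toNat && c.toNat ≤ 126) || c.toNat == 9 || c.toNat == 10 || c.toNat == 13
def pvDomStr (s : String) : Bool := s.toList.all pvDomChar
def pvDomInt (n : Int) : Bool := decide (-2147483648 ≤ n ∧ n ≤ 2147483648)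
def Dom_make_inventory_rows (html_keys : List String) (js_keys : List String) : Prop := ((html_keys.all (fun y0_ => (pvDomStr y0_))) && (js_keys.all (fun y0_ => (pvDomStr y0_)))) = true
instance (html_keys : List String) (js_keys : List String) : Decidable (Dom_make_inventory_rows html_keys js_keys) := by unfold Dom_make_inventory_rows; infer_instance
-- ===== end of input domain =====

-- B replaces A's per-key membership tests with a set-algebra partition into three fixed-status classes, sorted once at the end (alternative decomposition, same cost).


-- ===== PORT A =====
-- str(b) for a Python bool
def pyStrBool (b : Bool) : String := if b then "True" else "False"

def make_inventory_rows (html_keys : List String) (js_keys : List String) : List (List (String × String)) :=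
  let all_keys := PySem.List.sorted (PySem.Set.union (PySem.Set.ofList html_keys) js_keys) (fun x => x) false
  all_keys.foldl (fun rows key =>
    let in_html := html_keys.contains key
    let in_js := js_keys.contains key
    let status := if in_html && in_js then "OK" else if in_html then "Missing in JS" else "Unused in HTML"
    rows ++ [[("key", key), ("in_html", pyStrBool in_html), ("in_js_dictionary", pyStrBool in_js), ("status", status)]]) []

-- ===== PORT B =====
-- r["key"] on a row: first match in the association list; exact here since every row B builds carries "key"
def pyRowKey (r : List (String × String)) : String := ((r.find? (fun p => p.1 == "key")).map (·.2)).getD ""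

def make_inventory_rows_alt (html_keys : List String) (js_keys : List String) : List (List (String × String)) :=
  let html := PySem.Set.ofList html_keys
  let js := PySem.Set.ofList js_keys
  let rows :=
    (PySem.Set.inter html js).map (fun k => [("key", k), ("in_html", "True"), ("in_js_dictionary", "True"), ("status", "OK")])
    ++ (PySem.Set.diff html js).map (fun k => [("key", k), ("in_html", "True"), ("in_js_dictionary", "False"), ("status", "Missing in JS")])
    ++ (PySem.Set.diff js html).map (fun k => [("key", k), ("in_html", "False"), ("in_js_dictionary", "True"), ("status", "Unused in HTML")])
  PySem.List.sorted rows (fun r => pyRowKey r) false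

-- ===== PRECONDITION & SPEC =====
def Spec_make_inventory_rows (html_keys : List String) (js_keys : List String) (out : List (List (String × String))) : Prop := out = make_inventory_rows_alt html_keys js_keys
instance (html_keys : List String) (js_keys : List String) (out : List (List (String × String))) : Decidable (Spec_make_inventory_rows html_keys js_keys out) := by unfold Spec_make_inventory_rows; infer_instance

-- ===== CLAIM (what is proved, stated in full; the proofs are below) =====
def Claim_equal_make_inventory_rows : Prop := ∀ (html_keys : List String) (js_keys : List String), Dom_make_inventory_rows html_keys js_keys → Spec_make_inventory_rows html_keys js_keys (make_inventory_rows html_keys js_keys)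

-- ===== LEMMAS AND PROOFS =====

theorem mir_eq (html_keys js_keys : List String) :
    (PySem.List.sorted (PySem.Set.union (PySem.Set.ofList html_keys) js_keys) (fun x => x) false).foldl
      (fun rows key =>
        rows ++ [[("key", key), ("in_html", pyStrBool (html_keys.contains key)),
          ("in_js_dictionary", pyStrBool (js_keys.contains key)),
          ("status", if html_keys.contains key && js_keys.contains key then "OK"
            else if html_keys.contains key then "Missing in JS" else "Unused in HTML")]]) []
    = PySem.List.sorted
        ((PySem.Set.inter (PySem.Set.ofList html_keys) (PySem.Set.ofList js_keys)).map
            (fun k => [("key", k), ("in_html", "True"), ("in_js_dictionary", "True"), ("status", "OK")])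
          ++ (PySem.Set.diff (PySem.Set.ofList html_keys) (PySem.Set.ofList js_keys)).map
            (fun k => [("key", k), ("in_html", "True"), ("in_js_dictionary", "False"), ("status", "Missing in JS")])
          ++ (PySem.Set.diff (PySem.Set.ofList js_keys) (PySem.Set.ofList html_keys)).map
            (fun k => [("key", k), ("in_html", "False"), ("in_js_dictionary", "True"), ("status", "Unused in HTML")]))
        (fun r => pyRowKey r) false := by
  set h := PySem.Set.ofList html_keys with hh
  set j := PySem.Set.ofList js_keys with hj
  set f : String → List (String × String) := fun key =>
    [("key", key), ("in_html", pyStrBool (html_keys.contains key)),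
      ("in_js_dictionary", pyStrBool (js_keys.contains key)),
      ("status", if html_keys.contains key && js_keys.contains key then "OK"
        else if html_keys.contains key then "Missing in JS" else "Unused in HTML")] with hf
  have hU : PySem.Set.union h js_keys = PySem.Set.ofList (html_keys ++ js_keys) := by
    simp [hh, PySem.Set.ofList_append, PySem.Set.union]
  rw [PySem.List.foldl_append_singleton_eq_map f, List.nil_append, hU]
  -- rewrite B's three constant-row maps as maps of A's row function f
  have hseg1 : (PySem.Set.inter h j).map
      (fun k => [("key", k), ("in_html", "True"), ("in_js_dictionary", "True"), ("status", "OK")])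
      = (PySem.Set.inter h j).map f := by
    refine List.map_congr_left (fun k hk => ?_)
    rw [PySem.Set.mem_inter] at hk
    obtain ⟨hk1, hk2⟩ := hk
    rw [hh, PySem.Set.mem_ofList] at hk1
    rw [hj, PySem.Set.mem_ofList] at hk2
    simp [hf, pyStrBool, hk1, hk2]
  have hseg2 : (PySem.Set.diff h j).map
      (fun k => [("key", k), ("in_html", "True"), ("in_js_dictionary", "False"), ("status", "Missing in JS")])
      = (PySem.Set.diff h j).map f := by
    refine List.map_congr_left (fun k hk => ?_)
    rw [PySem.Set.mem_diff] at hk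
    obtain ⟨hk1, hk2⟩ := hk
    rw [hh, PySem.Set.mem_ofList] at hk1
    rw [hj, PySem.Set.mem_ofList] at hk2
    simp [hf, pyStrBool, hk1, hk2]
  have hseg3 : (PySem.Set.diff j h).map
      (fun k => [("key", k), ("in_html", "False"), ("in_js_dictionary", "True"), ("status", "Unused in HTML")])
      = (PySem.Set.diff j h).map f := by
    refine List.map_congr_left (fun k hk => ?_)
    rw [PySem.Set.mem_diff] at hk
    obtain ⟨hk1, hk2⟩ := hk
    rw [hj, PySem.Set.mem_ofList] at hk1
    rw [hh, PySem.Set.mem_ofList] at hk2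
    simp [hf, pyStrBool, hk1, hk2]
  rw [hseg1, hseg2, hseg3, ← List.map_append, ← List.map_append]
  -- the list of keys B partitions into
  set L := PySem.Set.inter h j ++ PySem.Set.diff h j ++ PySem.Set.diff j h with hL
  -- L is a permutation of the deduplicated union
  have hnodL : L.Nodup := by
    have nh := PySem.Set.nodup_ofList (α := String) html_keys
    have nj := PySem.Set.nodup_ofList (α := String) js_keys
    refine ((PySem.Set.nodup_inter h j nh).append (PySem.Set.nodup_diff h j nh) ?_).append
      (PySem.Set.nodup_diff j h nj) ?_
    · intro a ha hb
      rw [PySem.Set.mem_inter] at ha; rw [PySem.Set.mem_diff] at hb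
      exact hb.2 ha.2
    · intro a ha hb
      rw [PySem.Set.mem_diff] at hb
      rcases List.mem_append.mp ha with ha | ha
      · rw [PySem.Set.mem_inter] at ha; exact hb.2 ha.1
      · rw [PySem.Set.mem_diff] at ha; exact hb.2 ha.1
  have hperm : (PySem.Set.ofList (html_keys ++ js_keys)).Perm L := by
    refine (List.perm_ext_iff_of_nodup (PySem.Set.nodup_ofList _) hnodL).mpr (fun a => ?_)
    simp only [hL, PySem.Set.mem_ofList, List.mem_append, PySem.Set.mem_inter, PySem.Set.mem_diff,
      hh, hj]
    by_cases h1 : a ∈ html_keys <;> by_cases h2 : a ∈ js_keys <;>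
      simp [h1, h2]
  -- name the sorted order: A's list is a strictly key-increasing rearrangement of B's rows
  refine (PySem.List.sorted_eq_of_perm_of_pairwise_lt _ _ _ ?_ ?_).symm
  · exact ((PySem.List.sorted_perm _ _ _).trans hperm).map f
  · rw [List.pairwise_map]
    have : ∀ a : String, pyRowKey (f a) = a := by intro a; simp [hf, pyRowKey]
    simp only [this]
    exact PySem.List.sorted_ofList_pairwise_lt (html_keys ++ js_keys)

theorem make_inventory_rows_eq (html_keys js_keys : List String) :
    make_inventory_rows html_keys js_keys = make_inventory_rows_alt html_keys js_keys := by
  unfold make_inventory_rows make_inventory_rows_alt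
  exact mir_eq html_keys js_keys

-- ===== VERDICT (by name: the statement is the Claim_ definition above) =====
theorem make_inventory_rows_spec : Claim_equal_make_inventory_rows := by
  intro h j _
  unfold Spec_make_inventory_rows
  exact make_inventory_rows_eq h j
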